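-- pv_equiv track=rewrite | github.com/boyobob/OdinsList | OdinsList.py | publisher_matches
-- ===== SOURCE A (Python) =====
-- def publisher_matches(q_pub: str, cv_pub: str) -> bool:
--     """Check if publisher names match."""
--     if not q_pub or not cv_pub:
--         return False
--     q, c = q_pub.lower(), cv_pub.lower()
--     if q in c or c in q:
--         return True
--     aliases = {
--         "marvel": ["marvel comics", "marvel comics group"],
--         "dc": ["dc comics"],
--         "image": ["image comics"]
--     }
--     for key, vals in aliases.items():
--         if (q == key or q in vals) and (c == key or c in vals):
--             return True
--     return False
-- ===== SOURCE B (Python) =====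
-- def publisher_matches(q_pub: str, cv_pub: str) -> bool:
--     """Check if publisher names match.
--
--     The alias table in the original is dead code: within each alias group
--     ("marvel" < "marvel comics" < "marvel comics group", "dc" < "dc comics",
--     "image" < "image comics") every pair of members is already related by the
--     substring test, so that test alone decides the result.
--     """
--     if not q_pub or not cv_pub:
--         return False
--     q, c = q_pub.lower(), cv_pub.lower()
--     return q in c or c in q
-- ===== Notes on version B (the rewrite author's own statement) =====
-- stated objective: simpler
-- what changed: A's per-group alias scan is removed entirely as provably dead code: every alias group is a substring chain, so any same-group pair already passes the lowercase substring test and B is just the empty-guard plus one mutual-substring check.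
import Mathlib
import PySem

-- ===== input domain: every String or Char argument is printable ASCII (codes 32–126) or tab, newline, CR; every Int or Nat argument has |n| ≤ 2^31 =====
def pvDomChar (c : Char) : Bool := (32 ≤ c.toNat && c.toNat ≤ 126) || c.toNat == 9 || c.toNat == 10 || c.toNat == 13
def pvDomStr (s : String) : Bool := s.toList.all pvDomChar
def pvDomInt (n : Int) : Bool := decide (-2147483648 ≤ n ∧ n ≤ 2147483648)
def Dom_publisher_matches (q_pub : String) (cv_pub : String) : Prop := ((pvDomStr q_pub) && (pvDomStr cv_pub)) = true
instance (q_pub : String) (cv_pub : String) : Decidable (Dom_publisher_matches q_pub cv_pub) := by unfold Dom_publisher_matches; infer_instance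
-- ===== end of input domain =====

-- B deletes A's alias loop as provably dead code (each alias group is a substring chain), keeping only the guard and the mutual-substring test (objective: simpler).

-- ===== PORT A =====
-- the 'for key, vals in aliases.items()' loop, returning True at the first matching group
def pubAliasLoop (q c : String) : List (String × List String) → Bool
  | [] => false
  | (key, vals) :: rest =>
    if (q == key || vals.contains q) && (c == key || vals.contains c) then true
    else pubAliasLoop q c rest

def publisher_matches (q_pub : String) (cv_pub : String) : Bool :=
  if q_pub = "" || cv_pub = "" then false
  else if PySem.Str.isIn (PySem.Str.lower q_pub) (PySem.Str.lower cv_pub)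
       || PySem.Str.isIn (PySem.Str.lower cv_pub) (PySem.Str.lower q_pub) then true
  else
    pubAliasLoop (PySem.Str.lower q_pub) (PySem.Str.lower cv_pub)
      (PySem.Dict.ofList [("marvel", ["marvel comics", "marvel comics group"]),
                          ("dc", ["dc comics"]),
                          ("image", ["image comics"])]).items

-- ===== PORT B =====
def publisher_matches_alt (q_pub : String) (cv_pub : String) : Bool :=
  if q_pub = "" || cv_pub = "" then false
  else PySem.Str.isIn (PySem.Str.lower q_pub) (PySem.Str.lower cv_pub)
       || PySem.Str.isIn (PySem.Str.lower cv_pub) (PySem.Str.lower q_pub)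

-- ===== PRECONDITION & SPEC =====
def Spec_publisher_matches (q_pub : String) (cv_pub : String) (out : Bool) : Prop := out = publisher_matches_alt q_pub cv_pub
instance (q_pub : String) (cv_pub : String) (out : Bool) : Decidable (Spec_publisher_matches q_pub cv_pub out) := by unfold Spec_publisher_matches; infer_instance

-- ===== CLAIM =====
def Claim_equal_publisher_matches : Prop := ∀ (q_pub : String) (cv_pub : String), Dom_publisher_matches q_pub cv_pub → Spec_publisher_matches q_pub cv_pub (publisher_matches q_pub cv_pub)

-- ===== LEMMAS AND PROOFS =====

-- A's alias loop over the concrete table is dead: if some group contains both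
-- q and c, then q and c are substring-related (each group is a chain), so the
-- loop returns false whenever the mutual-substring test already failed.
lemma pub_alias_loop_dead (q c : String)
    (h : (PySem.Str.isIn q c || PySem.Str.isIn c q) = false) :
    pubAliasLoop q c (PySem.Dict.ofList [("marvel", ["marvel comics", "marvel comics group"]),
                          ("dc", ["dc comics"]),
                          ("image", ["image comics"])]).items = false := by
  have items : (PySem.Dict.ofList [("marvel", ["marvel comics", "marvel comics group"]),
                          ("dc", ["dc comics"]),
                          ("image", ["image comics"])]).items =
      [("marvel", ["marvel comics", "marvel comics group"]),
       ("dc", ["dc comics"]), ("image", ["image comics"])] := by rfl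
  rw [items]
  simp only [pubAliasLoop, List.contains_cons, List.contains_nil]
  split_ifs with h1 h2 h3
  · -- marvel group: q,c ∈ {marvel, marvel comics, marvel comics group}
    simp only [Bool.and_eq_true, Bool.or_eq_true, beq_iff_eq] at h1
    obtain ⟨hq, hc⟩ := h1
    rcases hq with hq | hq | hq | hq <;> rcases hc with hc | hc | hc | hc <;>
      first
        | (subst hq; subst hc; exact absurd h (by decide))
        | simp_all
  · simp only [Bool.and_eq_true, Bool.or_eq_true, beq_iff_eq] at h2
    obtain ⟨hq, hc⟩ := h2
    rcases hq with hq | hq | hq <;> rcases hc with hc | hc | hc <;>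
      first
        | (subst hq; subst hc; exact absurd h (by decide))
        | simp_all
  · simp only [Bool.and_eq_true, Bool.or_eq_true, beq_iff_eq] at h3
    obtain ⟨hq, hc⟩ := h3
    rcases hq with hq | hq | hq <;> rcases hc with hc | hc | hc <;>
      first
        | (subst hq; subst hc; exact absurd h (by decide))
        | simp_all
  · rfl

-- ===== VERDICT =====
theorem publisher_matches_spec : Claim_equal_publisher_matches := by
  intro q_pub cv_pub _
  unfold Spec_publisher_matches publisher_matches publisher_matches_alt
  split_ifs with h1 h2
  · rfl
  · exact h2.symm
  · rw [pub_alias_loop_dead _ _ (by revert h2; cases PySem.Str.isIn (PySem.Str.lower q_pub) (PySem.Str.lower cv_pub) <;> cases PySem.Str.isIn (PySem.Str.lower cv_pub) (PySem.Str.lower q_pub) <;> simp)]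
    revert h2
    cases PySem.Str.isIn (PySem.Str.lower q_pub) (PySem.Str.lower cv_pub) <;>
      cases PySem.Str.isIn (PySem.Str.lower cv_pub) (PySem.Str.lower q_pub) <;> simp
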